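-- pv_equiv track=rewrite | github.com/TetsuyaKomota/MyMasterStudies | final/models/RefactedRestaurant.py | changeBoundary
-- ===== SOURCE A (Python) =====
-- def changeBoundary(sentence, charsIdx):
--     if charsIdx <= 0 or charsIdx >= sum([len(w) for w in sentence]):
--         return sentence
--     currentNumofChars = 0
--     changedIdx  = -1
--     while currentNumofChars < charsIdx:
--         changedIdx  += 1
--         currentNumofChars += len(sentence[changedIdx])
--
--     o =  sentence[:changedIdx]
--     if currentNumofChars == charsIdx:
--         o += [sentence[changedIdx]+sentence[changedIdx+1]]
--         o += sentence[changedIdx+2:]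
--     else:
--         div = charsIdx - (currentNumofChars-len(sentence[changedIdx]))
--         o  += [sentence[changedIdx][:div],sentence[changedIdx][div:]]
--         o  += sentence[changedIdx+1:]
--     return o
-- ===== SOURCE B (Python) =====
-- def changeBoundary(sentence, charsIdx):
--     # prefix cumulative-length table + binary search for the boundary word
--     cum = []
--     total = 0
--     for w in sentence:
--         total += len(w)
--         cum.append(total)
--     if charsIdx <= 0 or charsIdx >= total:
--         return sentence
--     lo, hi = 0, len(cum)
--     while lo < hi:
--         mid = (lo + hi) // 2
--         if cum[mid] < charsIdx:
--             lo = mid + 1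
--         else:
--             hi = mid
--     i = lo
--     if cum[i] == charsIdx:
--         return sentence[:i] + [sentence[i] + sentence[i + 1]] + sentence[i + 2:]
--     div = charsIdx - (cum[i] - len(sentence[i]))
--     return sentence[:i] + [sentence[i][:div], sentence[i][div:]] + sentence[i + 1:]
-- ===== Notes on version B (the rewrite author's own statement) =====
-- stated objective: alternative
-- what changed: B builds a prefix cumulative-length table in one pass and locates the boundary word with a hand-written bisect_left binary search instead of A's stateful linear while-loop; the merge/split reconstruction branches read the table instead of loop state.
import Mathlib
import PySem

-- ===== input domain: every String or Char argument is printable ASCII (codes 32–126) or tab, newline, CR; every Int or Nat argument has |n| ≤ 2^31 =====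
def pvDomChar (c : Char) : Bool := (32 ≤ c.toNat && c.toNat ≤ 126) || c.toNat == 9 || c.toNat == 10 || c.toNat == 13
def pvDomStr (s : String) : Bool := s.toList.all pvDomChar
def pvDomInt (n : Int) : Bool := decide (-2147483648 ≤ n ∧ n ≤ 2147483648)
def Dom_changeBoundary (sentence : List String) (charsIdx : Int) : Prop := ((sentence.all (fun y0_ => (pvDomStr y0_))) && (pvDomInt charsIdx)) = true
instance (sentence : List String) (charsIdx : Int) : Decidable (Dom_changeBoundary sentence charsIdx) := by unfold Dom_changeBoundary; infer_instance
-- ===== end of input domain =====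

-- B replaces A's linear while-loop boundary search by a prefix cumulative-length table plus a
-- hand-written binary search (bisect_left); the reconstruction branches are unchanged. Objective: alternative.

-- ===== PORT A =====
-- A's while-loop: walk the words, advancing changedIdx / currentNumofChars while cur < charsIdx
def pvLoopA (charsIdx : Int) : List String → Int → Int → Int × Int
  | [], changedIdx, cur => (changedIdx, cur)
  | w :: ws, changedIdx, cur =>
      if cur < charsIdx then pvLoopA charsIdx ws (changedIdx + 1) (cur + PySem.Str.len w)
      else (changedIdx, cur)

def changeBoundary (sentence : List String) (charsIdx : Int) : List String :=
  if charsIdx ≤ 0 ∨ (sentence.map PySem.Str.len).sum ≤ charsIdx then sentence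
  else
    let p := pvLoopA charsIdx sentence (-1) 0
    let changedIdx := p.1
    let currentNumofChars := p.2
    let o := PySem.List.slice sentence none (some changedIdx)
    if currentNumofChars = charsIdx then
      o ++ [PySem.List.pyGetD sentence changedIdx "" ++ PySem.List.pyGetD sentence (changedIdx + 1) ""]
        ++ PySem.List.slice sentence (some (changedIdx + 2)) none
    else
      let dv := charsIdx - (currentNumofChars - PySem.Str.len (PySem.List.pyGetD sentence changedIdx ""))
      o ++ [PySem.Str.slice (PySem.List.pyGetD sentence changedIdx "") none (some dv),
            PySem.Str.slice (PySem.List.pyGetD sentence changedIdx "") (some dv) none]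
        ++ PySem.List.slice sentence (some (changedIdx + 1)) none

-- ===== PORT B =====
-- the one-pass cumulative-length table: (cum, total)
def pvBuildCum (sentence : List String) : List Int × Int :=
  sentence.foldl (fun acc w => (acc.1 ++ [acc.2 + PySem.Str.len w], acc.2 + PySem.Str.len w)) ([], 0)

-- hand-written bisect_left on the cum table (Source B's while lo < hi loop)
def pvBisect (cum : List Int) (x : Int) (lo hi : Int) : Int :=
  if h : lo < hi then
    let mid := PySem.Int.floordiv (lo + hi) 2
    if PySem.List.pyGetD cum mid 0 < x then pvBisect cum x (mid + 1) hi
    else pvBisect cum x lo mid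
  else lo
termination_by (hi - lo).toNat
decreasing_by
  · have := PySem.Int.floordiv_two_mid_bounds (le_of_lt h); omega
  · have h2 : PySem.Int.floordiv (lo + hi) 2 < hi :=
      (PySem.Int.floordiv_lt_iff_lt_mul (by norm_num)).2 (by omega)
    omega

def changeBoundary_alt (sentence : List String) (charsIdx : Int) : List String :=
  let p := pvBuildCum sentence
  let cum := p.1
  let total := p.2
  if charsIdx ≤ 0 ∨ total ≤ charsIdx then sentence
  else
    let i := pvBisect cum charsIdx 0 (cum.length : Int)
    if PySem.List.pyGetD cum i 0 = charsIdx then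
      PySem.List.slice sentence none (some i)
        ++ [PySem.List.pyGetD sentence i "" ++ PySem.List.pyGetD sentence (i + 1) ""]
        ++ PySem.List.slice sentence (some (i + 2)) none
    else
      let dv := charsIdx - (PySem.List.pyGetD cum i 0 - PySem.Str.len (PySem.List.pyGetD sentence i ""))
      PySem.List.slice sentence none (some i)
        ++ [PySem.Str.slice (PySem.List.pyGetD sentence i "") none (some dv),
            PySem.Str.slice (PySem.List.pyGetD sentence i "") (some dv) none]
        ++ PySem.List.slice sentence (some (i + 1)) none

-- ===== PRECONDITION & SPEC =====
def Spec_changeBoundary (sentence : List String) (charsIdx : Int) (out : List String) : Prop := out = changeBoundary_alt sentence charsIdx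
instance (sentence : List String) (charsIdx : Int) (out : List String) : Decidable (Spec_changeBoundary sentence charsIdx out) := by unfold Spec_changeBoundary; infer_instance

-- ===== CLAIM (what is proved, stated in full; the proofs are below) =====
def Claim_equal_changeBoundary : Prop := ∀ (sentence : List String) (charsIdx : Int), Dom_changeBoundary sentence charsIdx → Spec_changeBoundary sentence charsIdx (changeBoundary sentence charsIdx)

-- ===== LEMMAS AND PROOFS =====

-- the inclusive prefix-sum list of the word lengths, starting from accumulator t
def pvCumOf : List String → Int → List Int
  | [], _ => []
  | w :: ws, t => (t + PySem.Str.len w) :: pvCumOf ws (t + PySem.Str.len w)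

lemma pvLen_nonneg (w : String) : 0 ≤ PySem.Str.len w := by
  rw [PySem.Str.len_eq]; exact Int.natCast_nonneg _

lemma pvBuildCum_go (ws : List String) (acc : List Int) (t : Int) :
    ws.foldl (fun acc w => (acc.1 ++ [acc.2 + PySem.Str.len w], acc.2 + PySem.Str.len w)) (acc, t)
      = (acc ++ pvCumOf ws t, t + (ws.map PySem.Str.len).sum) := by
  induction ws generalizing acc t with
  | nil => simp [pvCumOf]
  | cons w ws ih =>
    rw [List.foldl_cons, ih]
    simp only [pvCumOf, List.map_cons, List.sum_cons, Prod.mk.injEq]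
    exact ⟨by simp, by ring⟩

lemma pvBuildCum_eq (s : List String) :
    pvBuildCum s = (pvCumOf s 0, (s.map PySem.Str.len).sum) := by
  simpa using pvBuildCum_go s [] 0

lemma pvCumOf_ge (ws : List String) (t : Int) : ∀ c ∈ pvCumOf ws t, t ≤ c := by
  induction ws generalizing t with
  | nil => simp [pvCumOf]
  | cons w ws ih =>
    intro c hc
    have hw := pvLen_nonneg w
    simp [pvCumOf] at hc
    rcases hc with h | h
    · omega
    · have := ih (t + PySem.Str.len w) c h; omega

lemma pvCumOf_pairwise (ws : List String) (t : Int) : (pvCumOf ws t).Pairwise (· ≤ ·) := by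
  induction ws generalizing t with
  | nil => simp [pvCumOf]
  | cons w ws ih =>
    simp only [pvCumOf, List.pairwise_cons]
    exact ⟨pvCumOf_ge ws (t + PySem.Str.len w), ih _⟩

lemma pvCumOf_mem_total (ws : List String) (t : Int) (h : ws ≠ []) :
    t + (ws.map PySem.Str.len).sum ∈ pvCumOf ws t := by
  induction ws generalizing t with
  | nil => exact absurd rfl h
  | cons w ws ih =>
    by_cases hws : ws = []
    · subst hws; simp [pvCumOf]
    · have h1 : pvCumOf (w :: ws) t
          = (t + PySem.Str.len w) :: pvCumOf ws (t + PySem.Str.len w) := rfl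
      rw [h1, List.mem_cons, List.map_cons, List.sum_cons,
        show t + (PySem.Str.len w + (List.map PySem.Str.len ws).sum)
          = (t + PySem.Str.len w) + (List.map PySem.Str.len ws).sum from by ring]
      exact Or.inr (ih (t + PySem.Str.len w) hws)

-- A's loop returns (start + 1 + first index of cum ≥ x, that cum value)
lemma pvLoopA_eq (x : Int) (ws : List String) (idx cur : Int)
    (hlt : cur < x) (hend : x ≤ cur + (ws.map PySem.Str.len).sum) :
    pvLoopA x ws idx cur
      = (idx + 1 + ((pvCumOf ws cur).findIdx (fun c => decide (x ≤ c)) : Int),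
         (pvCumOf ws cur).getD ((pvCumOf ws cur).findIdx (fun c => decide (x ≤ c))) 0) := by
  induction ws generalizing idx cur with
  | nil => simp at hend; omega
  | cons w ws ih =>
    rw [pvLoopA, if_pos hlt]
    by_cases hw : x ≤ cur + PySem.Str.len w
    · have : pvLoopA x ws (idx + 1) (cur + PySem.Str.len w) = (idx + 1, cur + PySem.Str.len w) := by
        cases ws with
        | nil => rfl
        | cons v vs => rw [pvLoopA, if_neg (by omega)]
      have hw2 : (decide (x ≤ cur + PySem.Str.len w)) = true := decide_eq_true hw
      rw [this]
      have h1 : pvCumOf (w :: ws) cur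
          = (cur + PySem.Str.len w) :: pvCumOf ws (cur + PySem.Str.len w) := rfl
      rw [h1, List.findIdx_cons, hw2]
      simp
    · have hsum : x ≤ (cur + PySem.Str.len w) + (ws.map PySem.Str.len).sum := by
        rw [List.map_cons, List.sum_cons] at hend; omega
      have hw' : (decide (x ≤ cur + PySem.Str.len w)) = false := by
        simp only [decide_eq_false_iff_not]; exact hw
      rw [ih (idx + 1) (cur + PySem.Str.len w) (by omega) hsum]
      have h1 : pvCumOf (w :: ws) cur
          = (cur + PySem.Str.len w) :: pvCumOf ws (cur + PySem.Str.len w) := rfl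
      rw [h1, List.findIdx_cons, hw', cond_false, Prod.mk.injEq]
      refine ⟨by push_cast; ring, by simp⟩

-- Source B's binary search returns k whenever cum is < x strictly below k and ≥ x from k on
lemma pvBisect_eq (C : List Int) (x : Int) (k : Nat) (hk : k < C.length)
    (Hlt : ∀ j (hj : j < C.length), j < k → C[j] < x)
    (Hge : ∀ j (hj : j < C.length), k ≤ j → x ≤ C[j]) :
    ∀ (lo hi : Int), 0 ≤ lo → lo ≤ (k : Int) → (k : Int) ≤ hi → hi ≤ (C.length : Int) →
      pvBisect C x lo hi = (k : Int) := by
  have main : ∀ (n : Nat) (lo hi : Int), (hi - lo).toNat ≤ n → 0 ≤ lo → lo ≤ (k : Int) →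
      (k : Int) ≤ hi → hi ≤ (C.length : Int) → pvBisect C x lo hi = (k : Int) := by
    intro n
    induction n with
    | zero =>
      intro lo hi hfuel h0 h1 h2 h3
      rw [pvBisect, dif_neg (by omega)]
      omega
    | succ n ih =>
      intro lo hi hfuel h0 h1 h2 h3
      by_cases hlohi : lo < hi
      · rw [pvBisect, dif_pos hlohi]
        have hmid := PySem.Int.floordiv_two_mid_bounds (le_of_lt hlohi)
        have hmidlt : PySem.Int.floordiv (lo + hi) 2 < hi :=
          (PySem.Int.floordiv_lt_iff_lt_mul (by norm_num)).2 (by omega)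
        set mid := PySem.Int.floordiv (lo + hi) 2 with hmiddef
        have hget : PySem.List.pyGetD C mid 0 = C[mid.toNat] :=
          PySem.List.pyGetD_eq_getElem C 0 (by omega) (by omega)
        by_cases hc : PySem.List.pyGetD C mid 0 < x
        · rw [if_pos hc]
          have hklt : mid.toNat < k := by
            by_contra hcon
            have := Hge mid.toNat (by omega) (by omega)
            rw [hget] at hc; omega
          exact ih (mid + 1) hi (by omega) (by omega) (by omega) h2 h3
        · rw [if_neg hc]
          have hkle : k ≤ mid.toNat := by
            by_contra hcon
            have := Hlt mid.toNat (by omega) (by omega)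
            rw [hget] at hc; omega
          exact ih lo mid (by omega) h0 h1 (by omega) (by omega)
      · rw [pvBisect, dif_neg hlohi]; omega
  intro lo hi h0 h1 h2 h3
  exact main (hi - lo).toNat lo hi (le_refl _) h0 h1 h2 h3

-- ===== VERDICT (by name: the statement is the Claim_ definition above) =====
theorem changeBoundary_spec : Claim_equal_changeBoundary := by
  intro sentence charsIdx _dom
  unfold Spec_changeBoundary changeBoundary changeBoundary_alt
  simp only [pvBuildCum_eq]
  by_cases hg : charsIdx ≤ 0 ∨ (sentence.map PySem.Str.len).sum ≤ charsIdx
  · rw [if_pos hg, if_pos hg]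
  · rw [if_neg hg, if_neg hg]
    rw [not_or, not_le, not_le] at hg
    obtain ⟨h0, hT⟩ := hg
    have hsne : sentence ≠ [] := by
      intro h; subst h; simp at hT; omega
    have hmem := pvCumOf_mem_total sentence 0 hsne
    set C := pvCumOf sentence 0 with hC
    set k := C.findIdx (fun c => decide (charsIdx ≤ c)) with hkdef
    have hk : k < C.length := List.findIdx_lt_length.2 ⟨_, hmem, by simp; omega⟩
    have hpair := pvCumOf_pairwise sentence 0
    have hgek : charsIdx ≤ C[k] := by
      have := @List.findIdx_getElem _ _ C hk
      simpa [hkdef] using this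
    have Hlt : ∀ j (hj : j < C.length), j < k → C[j] < charsIdx := by
      intro j hj hjk
      have := List.not_of_lt_findIdx (xs := C) (p := fun c => decide (charsIdx ≤ c)) hjk
      simp at this; omega
    have Hge : ∀ j (hj : j < C.length), k ≤ j → charsIdx ≤ C[j] := by
      intro j hj hkj
      rcases eq_or_lt_of_le hkj with h | h
      · exact h ▸ hgek
      · have hle := (List.pairwise_iff_getElem.1 (hC ▸ hpair)) k j hk hj h
        omega
    have hloop := pvLoopA_eq charsIdx sentence (-1) 0 h0 (by omega)
    rw [hloop]
    have hbis := pvBisect_eq C charsIdx k hk Hlt Hge 0 (C.length : Int) le_rfl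
      (by omega) (by omega) le_rfl
    rw [hbis]
    have e1 : (-1 : Int) + 1 + (k : Int) = (k : Int) := by ring
    rw [e1]
    rw [List.getD_eq_getElem C 0 hk]
    have e2 : PySem.List.pyGetD C (k : Int) 0 = C[k] := by
      rw [PySem.List.pyGetD_eq_getElem C 0 (by omega) (by exact_mod_cast hk)]
      simp
    rw [e2]
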